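-- pv_equiv track=rewrite | github.com/MemberJunction/MJ | scripts/convert-baseline-v5-to-postgres.py | extract_create_table
-- ===== SOURCE A (Python) =====
-- def extract_create_table(lines, start_i):
--     """Extract a CREATE TABLE block from start to GO.
--
--     The T-SQL format is:
--     CREATE TABLE [schema].[Table]
--     (
--     [col1] [type] ...,
--     [col2] [type] ...
--     )
--     GO
--     """
--     result = []
--     i = start_i
--     while i < len(lines):
--         stripped = lines[i].strip()
--         if stripped == 'GO':
--             i += 1
--             break
--         if stripped.startswith('IF @@ERROR'):
--             i += 1
--             continue
--         if stripped.startswith('PRINT N'):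
--             i += 1
--             continue
--         result.append(lines[i].rstrip())
--         i += 1
--     return result, i
-- ===== SOURCE B (Python) =====
-- def extract_create_table(lines, start_i):
--     """Two-pass version: first locate the GO boundary, then filter the slice."""
--     n = len(lines)
--     j = start_i
--     while j < n and lines[j].strip() != 'GO':
--         j += 1
--     next_i = j + 1 if j < n else j
--     result = [l.rstrip() for l in lines[start_i:j]
--               if not (l.strip().startswith('IF @@ERROR')
--                       or l.strip().startswith('PRINT N'))]
--     return result, next_i
-- ===== Notes on version B (the rewrite author's own statement) =====
-- stated objective: alternative
-- what changed: Replaces A's single interleaved while-loop (filtering and boundary tracking in one accumulator loop) with two separate passes: an index scan that finds the GO boundary, then a comprehension over the slice lines[start_i:boundary] that filters and rstrips.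
-- outside the precondition, e.g. on extract_create_table(['x', 'y'], -1): A returns (['y', 'x', 'y'], 2), B returns (['y'], 2)
import Mathlib
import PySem

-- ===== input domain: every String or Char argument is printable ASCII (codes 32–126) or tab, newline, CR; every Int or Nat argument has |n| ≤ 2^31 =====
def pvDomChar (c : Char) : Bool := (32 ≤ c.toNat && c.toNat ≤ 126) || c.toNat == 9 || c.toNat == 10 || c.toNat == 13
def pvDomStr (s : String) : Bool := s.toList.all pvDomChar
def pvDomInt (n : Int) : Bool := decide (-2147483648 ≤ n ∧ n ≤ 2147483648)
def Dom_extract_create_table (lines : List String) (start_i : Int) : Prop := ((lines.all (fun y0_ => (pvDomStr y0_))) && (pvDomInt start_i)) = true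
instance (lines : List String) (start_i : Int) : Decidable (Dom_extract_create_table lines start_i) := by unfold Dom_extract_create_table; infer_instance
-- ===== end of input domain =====

-- B separates GO-boundary detection from content filtering (two passes over a slice) instead of A's single interleaved loop; equal on start_i ≥ 0.


-- ===== PORT A =====
-- A's while-loop: one pass that both filters lines into `result` and advances `i`.
def pvGoA (lines : List String) (result : List String) (i : Int) : List String × Int :=
  if _h : i < (lines.length : Int) then
    match PySem.List.pyGet? lines i with
    | none => (result, i)   -- IndexError (only reachable for negative i); outside Pre_
    | some line =>
      let stripped := PySem.Str.strip line
      if stripped = "GO" then (result, i + 1)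
      else if PySem.Str.startswith stripped "IF @@ERROR" then pvGoA lines result (i + 1)
      else if PySem.Str.startswith stripped "PRINT N" then pvGoA lines result (i + 1)
      else pvGoA lines (result ++ [PySem.Str.rstrip line]) (i + 1)
  else (result, i)
termination_by ((lines.length : Int) - i).toNat
decreasing_by all_goals omega

def extract_create_table (lines : List String) (start_i : Int) : List String × Int :=
  pvGoA lines [] start_i

-- ===== PORT B =====
-- first pass: advance j while the stripped line is not 'GO'
def pvFindGO (lines : List String) (j : Int) : Int :=
  if _h : j < (lines.length : Int) then
    match PySem.List.pyGet? lines j with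
    | none => j   -- IndexError (negative j); outside Pre_
    | some l => if PySem.Str.strip l = "GO" then j else pvFindGO lines (j + 1)
  else j
termination_by ((lines.length : Int) - j).toNat
decreasing_by all_goals omega

-- the comprehension's filter+map
def pvKeep (l : String) : Option String :=
  if PySem.Str.startswith (PySem.Str.strip l) "IF @@ERROR"
     || PySem.Str.startswith (PySem.Str.strip l) "PRINT N" then none
  else some (PySem.Str.rstrip l)

def extract_create_table_alt (lines : List String) (start_i : Int) : List String × Int :=
  let j := pvFindGO lines start_i
  let next_i := if j < (lines.length : Int) then j + 1 else j
  ((PySem.List.slice lines (some start_i) (some j)).filterMap pvKeep, next_i)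

-- ===== PRECONDITION & SPEC =====
-- Pre_ restricts to the natural domain start_i ≥ 0: for negative start_i, A either raises
-- IndexError (start_i < -len) or relies on negative-index wraparound, re-reading lines from
-- the end and then again from the front — an accident of Python indexing, not the function's task.
def Pre_extract_create_table (lines : List String) (start_i : Int) : Prop := 0 ≤ start_i
instance (lines : List String) (start_i : Int) : Decidable (Pre_extract_create_table lines start_i) := by unfold Pre_extract_create_table; infer_instance

def pvWitness_extract_create_table : List String × Int := (["CREATE TABLE [a].[b]", "GO"], 0)

def Spec_extract_create_table (lines : List String) (start_i : Int) (out : List String × Int) : Prop := out = extract_create_table_alt lines start_i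
instance (lines : List String) (start_i : Int) (out : List String × Int) : Decidable (Spec_extract_create_table lines start_i out) := by unfold Spec_extract_create_table; infer_instance

-- ===== CLAIM (what is proved, stated in full; the proofs are below) =====
def Claim_equal_extract_create_table : Prop := ∀ (lines : List String) (start_i : Int), Dom_extract_create_table lines start_i → Pre_extract_create_table lines start_i → Spec_extract_create_table lines start_i (extract_create_table lines start_i)

-- ===== LEMMAS AND PROOFS =====

lemma pvFindGO_ge_aux (lines : List String) : ∀ (n : Nat) (j : Int),
    ((lines.length : Int) - j).toNat = n → j ≤ pvFindGO lines j := by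
  intro n
  induction n with
  | zero =>
    intro j hn
    rw [pvFindGO]
    split_ifs with h
    · omega
    · omega
  | succ n ih =>
    intro j hn
    rw [pvFindGO]
    split_ifs with h
    · cases hget : PySem.List.pyGet? lines j with
      | none => simp
      | some l =>
        simp only
        split_ifs with hgo
        · omega
        · have := ih (j + 1) (by omega)
          omega
    · omega

lemma pvFindGO_ge (lines : List String) (j : Int) : j ≤ pvFindGO lines j :=
  pvFindGO_ge_aux lines _ j rfl

lemma pyGet?_of_nonneg_lt (xs : List String) (i : Int) (h0 : 0 ≤ i)
    (hlt : i < (xs.length : Int)) :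
    PySem.List.pyGet? xs i = some (xs[i.toNat]'(by omega)) := by
  have hi : i = ((i.toNat : Nat) : Int) := (Int.toNat_of_nonneg h0).symm
  conv_lhs => rw [hi]
  rw [PySem.List.pyGet?_natCast]
  exact List.getElem?_eq_getElem (by omega)

lemma slice_self (xs : List String) (i : Int) (h0 : 0 ≤ i) :
    PySem.List.slice xs (some i) (some i) = [] := by
  rw [PySem.List.slice_toNat xs h0 h0]
  simp

lemma slice_cons (xs : List String) (i j : Int) (h0 : 0 ≤ i)
    (hlt : i < (xs.length : Int)) (hij : i + 1 ≤ j) :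
    PySem.List.slice xs (some i) (some j)
      = xs[i.toNat]'(by omega) :: PySem.List.slice xs (some (i + 1)) (some j) := by
  rw [PySem.List.slice_toNat xs h0 (by omega), PySem.List.slice_toNat xs (by omega) (by omega)]
  rw [List.drop_eq_getElem_cons (show i.toNat < xs.length by omega)]
  have h1 : (i + 1).toNat = i.toNat + 1 := by omega
  have h2 : j.toNat - i.toNat = (j.toNat - (i.toNat + 1)) + 1 := by omega
  rw [h1, h2, List.take_succ_cons]

lemma pvGoA_eq (lines : List String) (n : Nat) : ∀ (i : Int), 0 ≤ i →
    ((lines.length : Int) - i).toNat = n → ∀ (result : List String),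
    pvGoA lines result i =
      (result ++ (PySem.List.slice lines (some i) (some (pvFindGO lines i))).filterMap pvKeep,
       if pvFindGO lines i < (lines.length : Int) then pvFindGO lines i + 1 else pvFindGO lines i) := by
  induction n with
  | zero =>
    intro i h0 hn result
    rw [pvGoA, pvFindGO]
    have hge : (lines.length : Int) ≤ i := by omega
    rw [dif_neg (by omega), dif_neg (by omega)]
    rw [if_neg (by omega), slice_self lines i h0]
    simp
  | succ n ih =>
    intro i h0 hn result
    rw [pvGoA]
    conv_rhs => rw [pvFindGO]
    by_cases hlt : i < (lines.length : Int)
    · rw [dif_pos hlt, dif_pos hlt, pyGet?_of_nonneg_lt lines i h0 hlt]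
      simp only
      by_cases hgo : PySem.Str.strip (lines[i.toNat]'(by omega)) = "GO"
      · rw [if_pos hgo, if_pos hgo, if_pos hlt, slice_self lines i h0]
        simp
      · rw [if_neg hgo, if_neg hgo]
        have hge : i + 1 ≤ pvFindGO lines (i + 1) := pvFindGO_ge lines (i + 1)
        have hsl := slice_cons lines i (pvFindGO lines (i + 1)) h0 hlt hge
        have hrec := ih (i + 1) (by omega) (by omega)
        by_cases hif : PySem.Str.startswith (PySem.Str.strip (lines[i.toNat]'(by omega))) "IF @@ERROR" = true
        · rw [if_pos hif, hrec result, hsl]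
          have : pvKeep (lines[i.toNat]'(by omega)) = none := by
            simp only [pvKeep, hif, Bool.true_or, if_true]
          simp [this]
        · rw [if_neg hif]
          by_cases hpr : PySem.Str.startswith (PySem.Str.strip (lines[i.toNat]'(by omega))) "PRINT N" = true
          · rw [if_pos hpr, hrec result, hsl]
            have : pvKeep (lines[i.toNat]'(by omega)) = none := by
              simp only [pvKeep, hpr, Bool.or_true, if_true]
            simp [this]
          · rw [if_neg hpr, hrec, hsl]
            rw [Bool.not_eq_true] at hif hpr
            have : pvKeep (lines[i.toNat]'(by omega))
                = some (PySem.Str.rstrip (lines[i.toNat]'(by omega))) := by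
              simp only [pvKeep, hif, hpr, Bool.or_self, Bool.false_eq_true, if_false]
            simp [this]
    · rw [dif_neg hlt, dif_neg hlt, if_neg hlt, slice_self lines i h0]
      simp

-- ===== VERDICT (by name: the statement is the Claim_ definition above) =====
theorem extract_create_table_spec : Claim_equal_extract_create_table := by
  intro lines start_i _hdom hpre
  unfold Spec_extract_create_table extract_create_table extract_create_table_alt
  simpa using pvGoA_eq lines _ start_i hpre rfl []
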